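-- pv_equiv track=rewrite | github.com/Ascetics/ctfkit | web/qsnctf_valid_parentheses.py | process_parentheses
-- ===== SOURCE A (Python) =====
-- def process_parentheses(parentheses):
--     '''
--     欢迎来到编程世界！
--     你将连接到一个交互式服务。
--     在每一轮中，服务端会向你提供一个只包含括号字符的字符串。
--     你的任务是判断该字符串是否为一个有效的括号序列。
--     '''
--     round_count = 0  # 圆括号()
--     square_count = 0  # 方括号[]
--     curly_count = 0  # 花括号{}
--     for p in parentheses:
--         if p == '(':
--             round_count += 1
--         elif p == ')':
--             if 0 >= round_count:
--                 return False
--             else: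
--                 round_count -= 1
--         elif p == '[':
--             square_count += 1
--         elif p == ']':
--             if 0 >= square_count:
--                 return False
--             else:
--                 square_count -= 1
--         elif p == '{':
--             curly_count += 1
--         elif p == '}':
--             if 0 >= curly_count:
--                 return False
--             else:
--                 curly_count -= 1
--     return 0 == round_count and 0 == square_count and 0 == curly_count
-- ===== SOURCE B (Python) =====
-- def process_parentheses(parentheses):
--     # Three independent per-type prefix-balance scans instead of one interleaved loop.
--     for opener, closer in [('(', ')'), ('[', ']'), ('{', '}')]:
--         balance = 0
--         for p in parentheses:
--             if p == opener:
--                 balance += 1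
--             elif p == closer:
--                 balance -= 1
--                 if balance < 0:
--                     return False
--         if balance != 0:
--             return False
--     return True
-- ===== Notes on version B (the rewrite author's own statement) =====
-- stated objective: alternative
-- what changed: Replaces the single interleaved pass keeping three counters with three independent per-bracket-type scans, each maintaining one running prefix balance that must never go negative and end at zero.
import Mathlib
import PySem

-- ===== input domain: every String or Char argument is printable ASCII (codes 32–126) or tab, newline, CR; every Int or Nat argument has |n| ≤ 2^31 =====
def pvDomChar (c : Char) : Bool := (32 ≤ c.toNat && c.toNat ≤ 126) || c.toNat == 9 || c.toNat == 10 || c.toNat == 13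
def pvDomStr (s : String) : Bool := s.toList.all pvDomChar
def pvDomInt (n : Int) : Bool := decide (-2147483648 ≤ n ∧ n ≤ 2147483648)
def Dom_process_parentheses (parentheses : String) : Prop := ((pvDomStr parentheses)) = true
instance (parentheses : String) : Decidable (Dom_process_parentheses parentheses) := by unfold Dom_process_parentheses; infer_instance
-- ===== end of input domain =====

-- B replaces A's single interleaved three-counter pass with three independent
-- per-bracket-type prefix-balance scans (alternative decomposition, same cost).


-- ===== PORT A =====
-- A's loop over the string, carrying the three counters; early `return False` = `false`.
def pvLoopA : List Char → Int → Int → Int → Bool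
  | [], r, s, c => (0 == r && 0 == s && 0 == c)
  | p :: ps, r, s, c =>
    if p == '(' then pvLoopA ps (r + 1) s c
    else if p == ')' then (if 0 ≥ r then false else pvLoopA ps (r - 1) s c)
    else if p == '[' then pvLoopA ps r (s + 1) c
    else if p == ']' then (if 0 ≥ s then false else pvLoopA ps r (s - 1) c)
    else if p == '{' then pvLoopA ps r s (c + 1)
    else if p == '}' then (if 0 ≥ c then false else pvLoopA ps r s (c - 1))
    else pvLoopA ps r s c

def process_parentheses (parentheses : String) : Bool :=
  pvLoopA parentheses.toList 0 0 0

-- ===== PORT B =====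
-- one per-type scan: running balance, fail as soon as it goes negative, end at zero
def pvPass (o cl : Char) : List Char → Int → Bool
  | [], b => b == 0
  | p :: ps, b =>
    if p == o then pvPass o cl ps (b + 1)
    else if p == cl then (if b - 1 < 0 then false else pvPass o cl ps (b - 1))
    else pvPass o cl ps b

def process_parentheses_alt (parentheses : String) : Bool :=
  [('(', ')'), ('[', ']'), ('{', '}')].all
    (fun pr => pvPass pr.1 pr.2 parentheses.toList 0)

-- ===== PRECONDITION & SPEC =====
def Spec_process_parentheses (parentheses : String) (out : Bool) : Prop := out = process_parentheses_alt parentheses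
instance (parentheses : String) (out : Bool) : Decidable (Spec_process_parentheses parentheses out) := by unfold Spec_process_parentheses; infer_instance

-- ===== CLAIM (what is proved, stated in full; the proofs are below) =====
def Claim_equal_process_parentheses : Prop := ∀ (parentheses : String), Dom_process_parentheses parentheses → Spec_process_parentheses parentheses (process_parentheses parentheses)

-- ===== LEMMAS AND PROOFS =====

theorem pvDec (x : Int) : decide (x ≤ 0) = decide (x < 1) :=
  decide_eq_decide.mpr (by omega)

theorem pvBeq (x : Int) : ((0 : Int) == x) = (x == 0) := by
  by_cases h : x = 0 <;> simp [h, eq_comm]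

-- A's interleaved loop from counters (r, s, c) equals the conjunction of the
-- three per-type scans started from those balances.
theorem pvLoopA_eq_passes (cs : List Char) :
    ∀ (r s c : Int),
      pvLoopA cs r s c =
        (pvPass '(' ')' cs r && pvPass '[' ']' cs s && pvPass '{' '}' cs c) := by
  induction cs with
  | nil =>
      intro r s c
      simp [pvLoopA, pvPass, pvBeq]
  | cons p ps ih =>
      intro r s c
      by_cases h1 : p = '(' <;> by_cases h2 : p = ')' <;>
        by_cases h3 : p = '[' <;> by_cases h4 : p = ']' <;>
        by_cases h5 : p = '{' <;> by_cases h6 : p = '}' <;>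
        simp_all [pvLoopA, pvPass, pvDec, Bool.and_assoc, Bool.and_left_comm, Bool.and_comm]

theorem list_all_three :
    process_parentheses_alt = fun s =>
      (pvPass '(' ')' s.toList 0 && pvPass '[' ']' s.toList 0 && pvPass '{' '}' s.toList 0) := by
  funext s
  simp [process_parentheses_alt, Bool.and_assoc]

-- ===== VERDICT (by name: the statement is the Claim_ definition above) =====
theorem process_parentheses_spec : Claim_equal_process_parentheses := by
  intro s _
  unfold Spec_process_parentheses process_parentheses
  rw [pvLoopA_eq_passes, list_all_three]
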